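-- pv_equiv track=rewrite | github.com/callistac/HistogramCodingExercise | version_4.py | aggregate_orders
-- ===== SOURCE A (Python) =====
-- def aggregate_orders(pizza_orders):
--     '''
--     Aggregates the counts of all the orders with the same topping to obtain a histogram of total counts per topping.
--     '''
--     hist = {}
--     for pizza_type, num_orders in pizza_orders:
--         if pizza_type in hist.keys():
--             hist[pizza_type] += num_orders
--         else:
--             hist[pizza_type] = num_orders
--     return hist
-- ===== SOURCE B (Python) =====
-- def aggregate_orders(pizza_orders):
--     '''
--     Aggregates the counts of all the orders with the same topping to obtain a histogram of total counts per topping.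
--     '''
--     orders = list(pizza_orders)
--     types = []
--     for topping, _ in orders:
--         if topping not in types:
--             types.append(topping)
--     return {t: sum(n for tt, n in orders if tt == t) for t in types}
-- ===== Notes on version B (the rewrite author's own statement) =====
-- stated objective: alternative
-- what changed: Replaces the single accumulate-as-you-go dict pass with a collect-distinct-toppings pass followed by a per-topping re-scan that sums matching counts via a dict comprehension.
import Mathlib
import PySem

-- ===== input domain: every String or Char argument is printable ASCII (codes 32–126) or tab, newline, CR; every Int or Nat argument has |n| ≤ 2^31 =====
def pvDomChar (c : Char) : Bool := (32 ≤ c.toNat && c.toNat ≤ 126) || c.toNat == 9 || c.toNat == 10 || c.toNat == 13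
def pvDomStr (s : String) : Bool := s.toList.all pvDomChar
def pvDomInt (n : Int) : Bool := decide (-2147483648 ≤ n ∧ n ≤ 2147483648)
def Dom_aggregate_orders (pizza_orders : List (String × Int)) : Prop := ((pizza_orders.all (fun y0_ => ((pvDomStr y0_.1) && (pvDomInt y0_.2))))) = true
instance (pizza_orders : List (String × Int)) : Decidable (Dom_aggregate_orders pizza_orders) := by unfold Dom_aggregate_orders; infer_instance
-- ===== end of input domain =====

-- B replaces A's single accumulate-into-dict pass by collecting the distinct toppings
-- first and then summing the matching counts per topping (alternative decomposition, not faster).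


-- ===== PORT A =====
def aggregate_orders (pizza_orders : List (String × Int)) : List (String × Int) :=
  (pizza_orders.foldl
    (fun hist p =>
      if hist.contains p.1 then hist.insert p.1 (hist.getD p.1 0 + p.2)
      else hist.insert p.1 p.2)
    (PySem.Dict.empty : PySem.Dict String Int)).items

-- ===== PORT B =====
def aggregate_orders_alt (pizza_orders : List (String × Int)) : List (String × Int) :=
  let orders := pizza_orders
  let types := orders.foldl (fun s p => PySem.Set.add s p.1) ([] : PySem.Set String)
  types.map (fun t => (t, ((orders.filter (fun q => q.1 == t)).map (·.2)).sum))

-- ===== PRECONDITION & SPEC =====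
def Spec_aggregate_orders (pizza_orders : List (String × Int)) (out : List (String × Int)) : Prop := out = aggregate_orders_alt pizza_orders
instance (pizza_orders : List (String × Int)) (out : List (String × Int)) : Decidable (Spec_aggregate_orders pizza_orders out) := by unfold Spec_aggregate_orders; infer_instance

-- ===== CLAIM (what is proved, stated in full; the proofs are below) =====
def Claim_equal_aggregate_orders : Prop := ∀ (pizza_orders : List (String × Int)), Dom_aggregate_orders pizza_orders → Spec_aggregate_orders pizza_orders (aggregate_orders pizza_orders)

-- ===== LEMMAS AND PROOFS =====

-- A's loop body is an insert at key p.1 in both branches.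
theorem pv_stepA_eq :
    (fun (hist : PySem.Dict String Int) (p : String × Int) =>
      if hist.contains p.1 then hist.insert p.1 (hist.getD p.1 0 + p.2)
      else hist.insert p.1 p.2)
    = fun hist p => hist.insert p.1 (if hist.contains p.1 then hist.getD p.1 0 + p.2 else p.2) := by
  funext hist p
  by_cases h : hist.contains p.1 <;> simp [h]

-- The value A's dict holds at k after the loop: running sum of the matching counts.
theorem pv_getD_loop (l : List (String × Int)) (d : PySem.Dict String Int) (k : String) :
    (l.foldl (fun hist p =>
        if hist.contains p.1 then hist.insert p.1 (hist.getD p.1 0 + p.2)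
        else hist.insert p.1 p.2) d).getD k 0
      = d.getD k 0 + ((l.filter (fun q => q.1 == k)).map (·.2)).sum := by
  induction l generalizing d with
  | nil => simp
  | cons p l ih =>
    simp only [List.foldl_cons, List.filter_cons, ih]
    by_cases hk : p.1 = k
    · subst hk
      by_cases hc : d.contains p.1
      · simp [hc]; ring
      · have hc' : d.contains p.1 = false := by simpa using hc
        have h0 : d.getD p.1 0 = 0 := PySem.Dict.getD_of_not_contains d 0 hc'
        simp [hc, h0]
    · have : (p.1 == k) = false := by simp [hk]
      by_cases hc : d.contains p.1 <;>
        simp [hc, this, PySem.Dict.getD_insert, Ne.symm hk]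

theorem aggregate_orders_spec : Claim_equal_aggregate_orders := by
  intro l _
  unfold Spec_aggregate_orders aggregate_orders aggregate_orders_alt
  rw [pv_stepA_eq]
  have hnd : ((l.foldl (fun hist p => hist.insert p.1
      (if hist.contains p.1 then hist.getD p.1 0 + p.2 else p.2))
      (PySem.Dict.empty : PySem.Dict String Int)).keys).Nodup :=
    PySem.Dict.nodup_keys_foldl_insert_key l Prod.fst _ _ PySem.Dict.nodup_keys_empty
  rw [PySem.Dict.items_eq_map_keys _ hnd 0]
  rw [PySem.Dict.keys_foldl_insert_key]
  rw [← pv_stepA_eq]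
  have hkeys : PySem.Set.update (PySem.Dict.empty : PySem.Dict String Int).keys (l.map Prod.fst)
      = l.foldl (fun s p => PySem.Set.add s p.1) ([] : PySem.Set String) := by
    rw [← PySem.Set.update_map_eq_foldl_add]
    simp [PySem.Dict.keys_empty]
  rw [hkeys]
  apply List.map_congr_left
  intro k _
  rw [pv_getD_loop]
  simp
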